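-- pv_equiv track=rewrite | github.com/Ro022799/octal | conversion_octal.py | conversion_usuario
-- ===== SOURCE A (Python) =====
-- def conversion_usuario( usuarios, value_letters):
-- 	cont_user = []
-- 	for codigo in usuarios:
-- 		cont = 0
-- 		for letter in codigo:
-- 			for value, lett in value_letters:
-- 				if letter == lett:
-- 					cont += value
-- 		cont_user.append(cont)
-- 	return cont_user
-- ===== SOURCE B (Python) =====
-- def conversion_usuario(usuarios, value_letters):
--     cont_user = []
--     for codigo in usuarios:
--         counts = {}
--         for ch in codigo:
--             counts[ch] = counts.get(ch, 0) + 1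
--         cont_user.append(sum(value * counts.get(lett, 0) for value, lett in value_letters))
--     return cont_user
-- ===== Notes on version B (the rewrite author's own statement) =====
-- stated objective: alternative
-- what changed: B builds a character-count dict once per code and replaces the per-character inner scan of value_letters by a single weighted sum over value_letters with dict lookups.
import Mathlib
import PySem

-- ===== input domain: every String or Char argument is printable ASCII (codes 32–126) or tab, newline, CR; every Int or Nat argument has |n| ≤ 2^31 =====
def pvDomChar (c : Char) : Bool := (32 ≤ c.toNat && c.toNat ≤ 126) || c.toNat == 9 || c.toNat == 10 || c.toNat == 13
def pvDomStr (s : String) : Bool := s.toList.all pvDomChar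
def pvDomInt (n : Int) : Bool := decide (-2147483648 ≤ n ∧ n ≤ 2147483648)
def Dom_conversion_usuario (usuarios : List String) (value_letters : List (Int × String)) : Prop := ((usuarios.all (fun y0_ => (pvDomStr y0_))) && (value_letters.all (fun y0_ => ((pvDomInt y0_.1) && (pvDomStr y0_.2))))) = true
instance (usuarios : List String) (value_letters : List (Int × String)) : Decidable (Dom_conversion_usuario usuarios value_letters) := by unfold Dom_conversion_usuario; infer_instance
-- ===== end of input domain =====

-- B builds a per-code character-count dict and takes one weighted sum over value_letters, instead of A's per-character inner scan over value_letters.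


-- ===== PORT A =====
def conversion_usuario (usuarios : List String) (value_letters : List (Int × String)) : List Int :=
  usuarios.foldl (fun cont_user codigo =>
    cont_user ++ [codigo.toList.foldl (fun cont letter =>
      value_letters.foldl (fun cont vl =>
        if String.mk [letter] = vl.2 then cont + vl.1 else cont) cont) 0]) []

-- ===== PORT B =====
def conversion_usuario_alt (usuarios : List String) (value_letters : List (Int × String)) : List Int :=
  usuarios.foldl (fun cont_user codigo =>
    let counts : PySem.Dict String Int :=
      codigo.toList.foldl (fun d ch => d.insert (String.mk [ch]) (d.getD (String.mk [ch]) 0 + 1)) PySem.Dict.empty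
    cont_user ++ [(value_letters.map (fun vl => vl.1 * counts.getD vl.2 0)).sum]) []

-- ===== PRECONDITION & SPEC =====
def Spec_conversion_usuario (usuarios : List String) (value_letters : List (Int × String)) (out : List Int) : Prop := out = conversion_usuario_alt usuarios value_letters
instance (usuarios : List String) (value_letters : List (Int × String)) (out : List Int) : Decidable (Spec_conversion_usuario usuarios value_letters out) := by unfold Spec_conversion_usuario; infer_instance

-- ===== CLAIM (what is proved, stated in full; the proofs are below) =====
def Claim_equal_conversion_usuario : Prop := ∀ (usuarios : List String) (value_letters : List (Int × String)), Dom_conversion_usuario usuarios value_letters → Spec_conversion_usuario usuarios value_letters (conversion_usuario usuarios value_letters)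

-- ===== LEMMAS AND PROOFS =====

-- sum over a list of (pointwise) sums can be exchanged
theorem pv_sum_comm {α β : Type} (l : List α) (m : List β) (g : α → β → Int) :
    (l.map (fun a => (m.map (g a)).sum)).sum = (m.map (fun b => (l.map (fun a => g a b)).sum)).sum := by
  induction l with
  | nil => simp
  | cons a l ih =>
    simp only [List.map_cons, List.sum_cons, ih]
    rw [show (fun b => g a b + (l.map (fun a => g a b)).sum) = fun b => (fun b => g a b) b + (fun b => (l.map (fun a => g a b)).sum) b from rfl,
      List.sum_map_add]

-- a filtered-sum over characters equals value times occurrence count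
theorem pv_sum_if_eq_count (l : List Char) (t : String) (v : Int) :
    (l.map (fun a => if String.mk [a] = t then v else 0)).sum
      = v * ((l.map (fun a => String.mk [a])).count t : Int) := by
  induction l with
  | nil => simp
  | cons a l ih =>
    simp only [List.map_cons, List.sum_cons, ih, List.count_cons]
    by_cases h : String.mk [a] = t <;> simp [h] <;> push_cast <;> ring

-- the inner scan over value_letters adds the per-character contribution
theorem pv_inner_scan (value_letters : List (Int × String)) (c : Char) (cont : Int) :
    value_letters.foldl (fun cont vl => if String.mk [c] = vl.2 then cont + vl.1 else cont) cont
      = cont + (value_letters.map (fun vl => if String.mk [c] = vl.2 then vl.1 else 0)).sum := by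
  have h : (fun (cont : Int) (vl : Int × String) => if String.mk [c] = vl.2 then cont + vl.1 else cont)
      = fun cont vl => cont + (if String.mk [c] = vl.2 then vl.1 else 0) := by
    funext x vl; split <;> simp
  rw [h, PySem.List.foldl_add]

-- per-code totals of A and B coincide
theorem pv_code_total (codigo : String) (value_letters : List (Int × String)) :
    codigo.toList.foldl (fun cont letter =>
        value_letters.foldl (fun cont vl =>
          if String.mk [letter] = vl.2 then cont + vl.1 else cont) cont) 0
      = (value_letters.map (fun vl => vl.1 *
          (codigo.toList.foldl (fun d ch => d.insert (String.mk [ch]) (d.getD (String.mk [ch]) 0 + 1))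
            PySem.Dict.empty).getD vl.2 0)).sum := by
  have hc : ∀ t : String,
      (codigo.toList.foldl (fun d ch => d.insert (String.mk [ch]) (d.getD (String.mk [ch]) 0 + 1))
        PySem.Dict.empty).getD t 0
        = ((codigo.toList.map (fun ch => String.mk [ch])).count t : Int) := by
    intro t
    have step : ∀ (l : List Char) (d : PySem.Dict String Int),
        (l.foldl (fun d ch => d.insert (String.mk [ch]) (d.getD (String.mk [ch]) 0 + 1)) d).getD t 0
          = d.getD t 0 + ((l.map (fun ch => String.mk [ch])).count t : Int) := by
      intro l
      induction l with
      | nil => intro d; simp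
      | cons a l ih =>
        intro d
        simp only [List.foldl_cons, ih, List.map_cons, List.count_cons]
        by_cases h : t = String.mk [a]
        · subst h
          rw [PySem.Dict.getD_insert_self, beq_self_eq_true, if_pos rfl]
          push_cast; ring
        · rw [PySem.Dict.getD_insert_of_ne (hne := h)]
          have hb : (String.mk [a] == t) = false := by
            rw [beq_eq_false_iff_ne]; exact fun e => h e.symm
          rw [hb]; simp
    rw [step, PySem.Dict.getD_empty, zero_add]
  have h : (fun (cont : Int) (letter : Char) =>
      value_letters.foldl (fun cont vl => if String.mk [letter] = vl.2 then cont + vl.1 else cont) cont)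
      = fun cont letter => cont +
          (value_letters.map (fun vl => if String.mk [letter] = vl.2 then vl.1 else 0)).sum := by
    funext x letter; exact pv_inner_scan value_letters letter x
  rw [h, PySem.List.foldl_add, zero_add,
    pv_sum_comm codigo.toList value_letters (fun a vl => if String.mk [a] = vl.2 then vl.1 else 0)]
  refine congrArg List.sum (List.map_congr_left ?_)
  intro vl _
  rw [pv_sum_if_eq_count codigo.toList vl.2 vl.1, hc vl.2]

-- ===== VERDICT (by name: the statement is the Claim_ definition above) =====
theorem conversion_usuario_spec : Claim_equal_conversion_usuario := by
  intro usuarios value_letters _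
  unfold Spec_conversion_usuario conversion_usuario conversion_usuario_alt
  rw [PySem.List.foldl_append_singleton_eq_map, PySem.List.foldl_append_singleton_eq_map]
  refine congrArg _ (List.map_congr_left ?_)
  intro codigo _
  exact pv_code_total codigo value_letters
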